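-- pv_equiv track=rewrite | github.com/Kev-L27/Algorithm-Design-and-Analysis | Week 4/Assignment/Solution/a4p1.py | isDifferent
-- ===== SOURCE A (Python) =====
-- def isDifferent(P, Q):
--     # Are the graphs P and Q different?
--     if(len(P) != len(Q)):
--         return True
--
--     for u in range(len(P)):
--         for v in P[u]:
--             if v not in Q[u]:
--                 return True
--
--     for u in range(len(Q)):
--         for v in Q[u]:
--             if v not in P[u]:
--                 return True
--
--     return False
-- ===== SOURCE B (Python) =====
-- def isDifferent(P, Q):
--     # One symmetric pass: graphs differ iff sizes differ or some node's
--     # neighbor set differs (set equality collapses duplicates exactly as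
--     # A's two directional membership scans do).
--     return len(P) != len(Q) or any(set(P[u]) != set(Q[u]) for u in range(len(P)))
-- ===== Notes on version B (the rewrite author's own statement) =====
-- stated objective: simpler
-- what changed: A's two separate directional nested membership loops are collapsed into a single pass over node indices comparing the neighbor sets of each node for set equality.
import Mathlib
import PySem

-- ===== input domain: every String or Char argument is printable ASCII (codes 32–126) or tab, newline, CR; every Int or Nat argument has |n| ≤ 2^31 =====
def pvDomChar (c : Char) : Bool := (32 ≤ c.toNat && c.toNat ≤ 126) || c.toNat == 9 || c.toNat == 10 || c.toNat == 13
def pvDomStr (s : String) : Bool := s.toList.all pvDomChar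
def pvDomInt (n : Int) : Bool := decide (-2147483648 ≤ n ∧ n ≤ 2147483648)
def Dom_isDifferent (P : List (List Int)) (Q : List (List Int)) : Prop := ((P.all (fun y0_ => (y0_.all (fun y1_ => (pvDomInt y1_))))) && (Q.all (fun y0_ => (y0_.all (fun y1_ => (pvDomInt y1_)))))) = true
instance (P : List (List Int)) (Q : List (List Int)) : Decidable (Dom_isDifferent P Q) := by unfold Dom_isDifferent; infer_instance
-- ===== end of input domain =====

-- B replaces A's two directional nested membership loops with one pass comparing neighbor sets per node (objective: simpler).


-- ===== PORT A =====
-- indexing Q[u]/P[u] is exact: it only happens after len(P) == len(Q) with u < that length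
def isDifferent (P : List (List Int)) (Q : List (List Int)) : Bool :=
  if P.length ≠ Q.length then true
  else if (List.range P.length).any (fun u => (P.getD u []).any (fun v => !((Q.getD u []).contains v))) then true
  else if (List.range Q.length).any (fun u => (Q.getD u []).any (fun v => !((P.getD u []).contains v))) then true
  else false

-- ===== PORT B =====
def isDifferent_alt (P : List (List Int)) (Q : List (List Int)) : Bool :=
  (P.length != Q.length) ||
    (List.range P.length).any (fun u =>
      !(PySem.Set.equal (PySem.Set.ofList (P.getD u [])) (PySem.Set.ofList (Q.getD u []))))

-- ===== PRECONDITION & SPEC =====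
def Spec_isDifferent (P : List (List Int)) (Q : List (List Int)) (out : Bool) : Prop := out = isDifferent_alt P Q
instance (P : List (List Int)) (Q : List (List Int)) (out : Bool) : Decidable (Spec_isDifferent P Q out) := by unfold Spec_isDifferent; infer_instance

-- ===== CLAIM (what is proved, stated in full; the proofs are below) =====
def Claim_equal_isDifferent : Prop := ∀ (P : List (List Int)) (Q : List (List Int)), Dom_isDifferent P Q → Spec_isDifferent P Q (isDifferent P Q)

-- ===== LEMMAS AND PROOFS =====

-- per-node: the two directional "some neighbor missing" scans together say exactly "the neighbor sets differ"
theorem pvPerNode (a b : List Int) :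
    ((a.any (fun v => !(b.contains v))) || (b.any (fun v => !(a.contains v))))
      = !(PySem.Set.equal (PySem.Set.ofList a) (PySem.Set.ofList b)) := by
  cases hE : PySem.Set.equal (PySem.Set.ofList a) (PySem.Set.ofList b) with
  | true =>
    have hmem : ∀ x : Int, x ∈ a ↔ x ∈ b := by
      intro x
      have := ((PySem.Set.equal_iff _ _).mp hE) x
      simpa [PySem.Set.mem_ofList] using this
    simp only [Bool.not_true]
    rw [Bool.or_eq_false_iff]
    constructor <;> (rw [List.any_eq_false]; intro v hv; simp [List.contains_eq_mem, (hmem v).mp, (hmem v).mpr, hv])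
  | false =>
    have : ¬ ∀ x : Int, x ∈ PySem.Set.ofList a ↔ x ∈ PySem.Set.ofList b := by
      intro hall
      rw [(PySem.Set.equal_iff _ _).mpr hall] at hE
      exact Bool.noConfusion hE
    rcases not_forall.mp this with ⟨x, hx⟩
    simp only [PySem.Set.mem_ofList] at hx
    simp only [Bool.not_false]
    rw [Bool.or_eq_true]
    by_cases hxa : x ∈ a
    · have hxb : x ∉ b := fun hb => hx ⟨fun _ => hb, fun _ => hxa⟩
      exact Or.inl (List.any_eq_true.mpr ⟨x, hxa, by simp [List.contains_eq_mem, hxb]⟩)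
    · have hxb : x ∈ b := by
        by_contra hb
        exact hx ⟨fun h => absurd h hxa, fun h => absurd h hb⟩
      exact Or.inr (List.any_eq_true.mpr ⟨x, hxb, by simp [List.contains_eq_mem, hxa]⟩)

-- two early-return passes over the same index range = one pass testing the disjunction
theorem pvAnyOr {α : Type} (l : List α) (p q : α → Bool) :
    (l.any fun x => p x || q x) = (l.any p || l.any q) := by
  induction l with
  | nil => rfl
  | cons h t ih => simp [List.any_cons, ih, Bool.or_assoc, Bool.or_left_comm]

-- the if-then-True early-return chain is a disjunction
theorem pvChain (b1 b2 : Bool) :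
    (if b1 = true then true else if b2 = true then true else false) = (b1 || b2) := by
  cases b1 <;> cases b2 <;> simp

-- ===== VERDICT (by name: the statement is the Claim_ definition above) =====
theorem isDifferent_spec : Claim_equal_isDifferent := by
  intro P Q _
  unfold Spec_isDifferent isDifferent isDifferent_alt
  by_cases h : P.length = Q.length
  · rw [if_neg (by simp [h]), pvChain, h]
    rw [bne_self_eq_false, Bool.false_or, ← pvAnyOr]
    exact List.any_congr rfl (fun u => pvPerNode _ _)
  · rw [if_pos (by simpa using h)]
    have hne : (P.length != Q.length) = true := by simp [h]
    rw [hne, Bool.true_or]
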